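-- pv_equiv track=rewrite | github.com/elpolopolin/intro_progra | guia7.py | pos_secuencia_mas_larga
-- ===== SOURCE A (Python) =====
-- def pos_secuencia_mas_larga(s: list[int]) -> int:
--     if not s:
--         return -1  # lista vacía
--     max_long = 1
--     max_pos = 0
--     i = 0
--     while i < len(s):
--         j = i
--         while j + 1 < len(s) and s[j] < s[j + 1]:
--             j += 1
--         long_actual = j - i + 1
--         if long_actual > max_long:
--             max_long = long_actual
--             max_pos = i
--
--         i = j + 1  # saltamos al próximo inicio de secuencia
--
--     return max_pos
-- ===== SOURCE B (Python) =====
-- def pos_secuencia_mas_larga(s: list[int]) -> int: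
--     if not s:
--         return -1
--     max_long = 1
--     max_pos = 0
--     cur_start = 0
--     cur_len = 1
--     for i in range(1, len(s)):
--         if s[i - 1] < s[i]:
--             cur_len += 1
--         else:
--             cur_start = i
--             cur_len = 1
--         if cur_len > max_long:
--             max_long = cur_len
--             max_pos = cur_start
--     return max_pos
-- ===== Notes on version B (the rewrite author's own statement) =====
-- stated objective: simpler
-- what changed: Replaced the nested while-loops (inner scan to each run's end, outer jump to the next run start) by one flat pass over indices 1..n-1 maintaining the current run's start and length with a strict running maximum.
import Mathlib
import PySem

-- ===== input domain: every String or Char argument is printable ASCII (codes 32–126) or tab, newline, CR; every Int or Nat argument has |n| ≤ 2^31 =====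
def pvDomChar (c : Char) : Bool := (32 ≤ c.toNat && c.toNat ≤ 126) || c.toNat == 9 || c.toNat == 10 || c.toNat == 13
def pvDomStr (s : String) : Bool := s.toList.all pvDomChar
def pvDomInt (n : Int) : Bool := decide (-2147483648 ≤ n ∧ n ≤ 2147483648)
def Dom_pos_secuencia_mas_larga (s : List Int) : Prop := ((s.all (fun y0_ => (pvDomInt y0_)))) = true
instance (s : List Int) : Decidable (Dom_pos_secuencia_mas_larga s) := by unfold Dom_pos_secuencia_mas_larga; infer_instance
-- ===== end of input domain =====

-- B replaces A's nested while-loops by one flat pass maintaining the current run; same O(n) cost, simpler.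

-- ===== PORT A =====
-- inner while loop of A: advance j while j+1 < len(s) and s[j] < s[j+1].
-- The fuel argument (always called with s.length, enough for the whole scan) only makes
-- the recursion structural; all list accesses of both ports are at in-range indices, so getD is exact.
def aRunEnd (s : List Int) : Nat → Nat → Nat
  | 0, j => j
  | fuel + 1, j =>
    if j + 1 < s.length ∧ s.getD j 0 < s.getD (j + 1) 0 then aRunEnd s fuel (j + 1) else j

-- outer while loop of A (fuel s.length + 1 covers every iteration plus the exit test)
def aLoop (s : List Int) : Nat → Nat → Nat → Nat → Nat
  | 0, _, _, mp => mp
  | fuel + 1, i, ml, mp =>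
    if i < s.length then
      let j := aRunEnd s s.length i
      let L := j - i + 1
      if L > ml then aLoop s fuel (j + 1) L i else aLoop s fuel (j + 1) ml mp
    else mp

def pos_secuencia_mas_larga (s : List Int) : Int :=
  if s = [] then -1 else ((aLoop s (s.length + 1) 0 1 0 : Nat) : Int)

-- ===== PORT B =====
-- the flat for-loop of B over i = 1 .. len(s)-1 with state (max_long, max_pos, cur_start, cur_len);
-- fuel s.length covers every iteration.
def bLoop (s : List Int) : Nat → Nat → Nat → Nat → Nat → Nat → Nat
  | 0, _, _, mp, _, _ => mp
  | fuel + 1, i, ml, mp, cs, cl =>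
    if i < s.length then
      let cs' := if s.getD (i - 1) 0 < s.getD i 0 then cs else i
      let cl' := if s.getD (i - 1) 0 < s.getD i 0 then cl + 1 else 1
      let ml' := if cl' > ml then cl' else ml
      let mp' := if cl' > ml then cs' else mp
      bLoop s fuel (i + 1) ml' mp' cs' cl'
    else mp

def pos_secuencia_mas_larga_alt (s : List Int) : Int :=
  if s = [] then -1 else ((bLoop s s.length 1 1 0 0 1 : Nat) : Int)

-- ===== PRECONDITION & SPEC =====
def Spec_pos_secuencia_mas_larga (s : List Int) (out : Int) : Prop := out = pos_secuencia_mas_larga_alt s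
instance (s : List Int) (out : Int) : Decidable (Spec_pos_secuencia_mas_larga s out) := by unfold Spec_pos_secuencia_mas_larga; infer_instance

-- ===== CLAIM (what is proved, stated in full; the proofs are below) =====
def Claim_equal_pos_secuencia_mas_larga : Prop := ∀ (s : List Int), Dom_pos_secuencia_mas_larga s → Spec_pos_secuencia_mas_larga s (pos_secuencia_mas_larga s)

-- ===== LEMMAS AND PROOFS =====

-- the inner while never moves j backwards (any fuel)
theorem aRunEnd_ge (s : List Int) : ∀ f j, j ≤ aRunEnd s f j := by
  intro f
  induction f with
  | zero => intro j; exact Nat.le_refl j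
  | succ f ih =>
    intro j
    rw [aRunEnd]
    split_ifs with h
    · have := ih (j + 1); omega
    · exact Nat.le_refl j

theorem aRunEnd_lt (s : List Int) : ∀ f j, j < s.length → aRunEnd s f j < s.length := by
  intro f
  induction f with
  | zero => intro j h; exact h
  | succ f ih =>
    intro j h
    rw [aRunEnd]
    split_ifs with hc
    · exact ih (j + 1) hc.1
    · exact h

-- every step strictly inside the scanned run is increasing (any fuel)
theorem aRunEnd_run (s : List Int) :
    ∀ f j k, j ≤ k → k < aRunEnd s f j → s.getD k 0 < s.getD (k + 1) 0 := by
  intro f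
  induction f with
  | zero => intro j k h1 h2; rw [aRunEnd] at h2; omega
  | succ f ih =>
    intro j k h1 h2
    rw [aRunEnd] at h2
    split_ifs at h2 with hc
    · rcases Nat.eq_or_lt_of_le h1 with rfl | hlt
      · exact hc.2
      · exact ih (j + 1) k hlt h2
    · omega

-- with enough fuel the scan stops exactly where the while condition fails
theorem aRunEnd_stop (s : List Int) :
    ∀ f j, s.length ≤ f + j →
      ¬ (aRunEnd s f j + 1 < s.length ∧ s.getD (aRunEnd s f j) 0 < s.getD (aRunEnd s f j + 1) 0) := by
  intro f
  induction f with
  | zero => intro j hf; rw [aRunEnd]; omega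
  | succ f ih =>
    intro j hf
    rw [aRunEnd]
    split_ifs with hc
    · exact ih (j + 1) (by omega)
    · exact hc

-- both loops return mp once the index is past the end, whatever the fuel
theorem aLoop_exit (s : List Int) (f i ml mp : Nat) (h : ¬ i < s.length) :
    aLoop s f i ml mp = mp := by
  cases f with
  | zero => rw [aLoop]
  | succ f => rw [aLoop, if_neg h]

theorem bLoop_exit (s : List Int) (f i ml mp cs cl : Nat) (h : ¬ i < s.length) :
    bLoop s f i ml mp cs cl = mp := by
  cases f with
  | zero => rw [bLoop]
  | succ f => rw [bLoop, if_neg h]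

-- climbing a run: B's per-index strict max-updates along the run from c collapse
-- to the single comparison with the final run length, keeping the leftmost start.
theorem bLoop_climb (s : List Int) (c ml0 mp0 : Nat) (hc : c < s.length) :
    ∀ d i f, c < i → i ≤ aRunEnd s s.length c + 1 → aRunEnd s s.length c + 1 - i = d → d ≤ f →
      bLoop s f i (if i - c > ml0 then i - c else ml0) (if i - c > ml0 then c else mp0) c (i - c)
      = bLoop s (f - d) (aRunEnd s s.length c + 1)
          (if aRunEnd s s.length c + 1 - c > ml0 then aRunEnd s s.length c + 1 - c else ml0)
          (if aRunEnd s s.length c + 1 - c > ml0 then c else mp0) c (aRunEnd s s.length c + 1 - c) := by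
  have hel : aRunEnd s s.length c < s.length := aRunEnd_lt s s.length c hc
  intro d
  induction d with
  | zero =>
    intro i f hci hie hd _
    have hi : i = aRunEnd s s.length c + 1 := by omega
    subst hi; rfl
  | succ d ih =>
    intro i f hci hie hd hdf
    have hi : i < s.length := by omega
    have hinc : s.getD (i - 1) 0 < s.getD i 0 := by
      have h := aRunEnd_run s s.length c (i - 1) (by omega) (by omega)
      have h1 : i - 1 + 1 = i := by omega
      rwa [h1] at h
    have hf : f = (f - 1) + 1 := by omega
    rw [hf, bLoop, if_pos hi]
    simp only [if_pos hinc]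
    have hgoal := ih (i + 1) (f - 1) (by omega) (by omega) (by omega) (by omega)
    have e1 : (if i - c + 1 > (if i - c > ml0 then i - c else ml0) then i - c + 1
                else (if i - c > ml0 then i - c else ml0))
              = (if i + 1 - c > ml0 then i + 1 - c else ml0) := by
      split_ifs <;> omega
    have e2 : (if i - c + 1 > (if i - c > ml0 then i - c else ml0) then c
                else (if i - c > ml0 then c else mp0))
              = (if i + 1 - c > ml0 then c else mp0) := by
      split_ifs <;> omega
    have e3 : i - c + 1 = i + 1 - c := by omega
    have e4 : f - 1 - d = f - 1 + 1 - (d + 1) := by omega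
    rw [e1, e2, e3]
    rw [e4] at hgoal
    exact hgoal

-- main correspondence: when A is about to scan the run starting at i,
-- B has just reset its current run to start i with length 1.
theorem aLoop_eq_bLoop (s : List Int) :
    ∀ fa i ml mp fb, s.length ≤ fa + i → s.length ≤ fb + i + 1 → i < s.length → 1 ≤ ml →
      aLoop s fa i ml mp = bLoop s fb (i + 1) ml mp i 1 := by
  intro fa
  induction fa with
  | zero => intro i ml mp fb hfa _ hi _; omega
  | succ fa ih =>
  intro i ml mp fb hfa hfb hi hml
  have hge := aRunEnd_ge s s.length i
  have hel := aRunEnd_lt s s.length i hi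
  have hstop := aRunEnd_stop s s.length i (by omega)
  have hclimb := bLoop_climb s i ml mp hi (aRunEnd s s.length i - i) (i + 1) fb
    (by omega) (by omega) (by omega) (by omega)
  have h1c : i + 1 - i = 1 := by omega
  have h1ml : ¬ (1 > ml) := by omega
  rw [h1c, if_neg h1ml, if_neg h1ml] at hclimb
  have hL : aRunEnd s s.length i + 1 - i = aRunEnd s s.length i - i + 1 := by omega
  rw [hL] at hclimb
  rw [aLoop, if_pos hi]
  simp only
  rw [hclimb]
  by_cases hnext : aRunEnd s s.length i + 1 < s.length
  · -- B's step at index aRunEnd+1 is a reset (the run just ended there)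
    have hnotinc : ¬ (s.getD (aRunEnd s s.length i + 1 - 1) 0 < s.getD (aRunEnd s s.length i + 1) 0) := by
      have h11 : aRunEnd s s.length i + 1 - 1 = aRunEnd s s.length i := by omega
      rw [h11]; intro hcon; exact hstop ⟨hnext, hcon⟩
    have hf : fb - (aRunEnd s s.length i - i) = (fb - (aRunEnd s s.length i - i) - 1) + 1 := by omega
    rw [hf, bLoop, if_pos hnext]
    simp only [if_neg hnotinc]
    have hML1 : ¬ (1 > (if aRunEnd s s.length i - i + 1 > ml then aRunEnd s s.length i - i + 1 else ml)) := by
      split_ifs <;> omega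
    rw [if_neg hML1, if_neg hML1]
    have hIH := ih (aRunEnd s s.length i + 1)
      (if aRunEnd s s.length i - i + 1 > ml then aRunEnd s s.length i - i + 1 else ml)
      (if aRunEnd s s.length i - i + 1 > ml then i else mp)
      (fb - (aRunEnd s s.length i - i) - 1)
      (by omega) (by omega) hnext (by split_ifs <;> omega)
    rw [← hIH]
    split_ifs <;> rfl
  · rw [bLoop_exit s _ _ _ _ _ _ hnext]
    split_ifs with h <;> rw [aLoop_exit s _ _ _ _ hnext]

-- ===== VERDICT (by name: the statement is the Claim_ definition above) =====
theorem pos_secuencia_mas_larga_spec : Claim_equal_pos_secuencia_mas_larga := by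
  intro s _
  unfold Spec_pos_secuencia_mas_larga pos_secuencia_mas_larga pos_secuencia_mas_larga_alt
  by_cases hs : s = []
  · rw [if_pos hs, if_pos hs]
  · rw [if_neg hs, if_neg hs]
    have hlen : 0 < s.length := List.length_pos_iff.mpr hs
    rw [aLoop_eq_bLoop s (s.length + 1) 0 1 0 s.length (by omega) (by omega) hlen (by omega)]
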